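-- pv_equiv track=rewrite | github.com/AmazingCodeLines/python-exercises | Beginner/challenge12_3.py | subtraction_of_binaries
-- ===== SOURCE A (Python) =====
-- def subtraction_of_binaries(padded_binary_one, padded_binary_two):
--     difference_of_binaries = []
--     borrow = 0
--
--     for i in range(len(padded_binary_one) - 1, -1, -1):
--
--         digit_binary_one = int(padded_binary_one[i])
--         digit_binary_two = int(padded_binary_two[i])
--
--         if borrow != 0:
--             digit_binary_one -= 1
--             borrow = 0
--
--         if digit_binary_one < digit_binary_two:
--             digit_binary_one += 2
--             borrow = 1
--
--         bit_result = digit_binary_one - digit_binary_two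
--         difference_of_binaries.append(str(bit_result))
--
--     difference_of_binaries.reverse()
--
--     return ''.join(difference_of_binaries)
-- ===== SOURCE B (Python) =====
-- def subtraction_of_binaries(padded_binary_one, padded_binary_two):
--     bits = []
--     for i in range(len(padded_binary_one)):
--         # a borrow arrives at position i exactly when the remaining lower-order
--         # part of the minuend is smaller than that of the subtrahend
--         borrow = padded_binary_one[i + 1:] < padded_binary_two[i + 1:]
--         bit = int(padded_binary_one[i]) - borrow - int(padded_binary_two[i])
--         bits.append(str(bit + 2 if bit < 0 else bit))
--     return ''.join(bits)
-- ===== Notes on version B (the rewrite author's own statement) =====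
-- stated objective: alternative
-- what changed: Replaces A's stateful LSB-to-MSB loop that threads a borrow flag with a stateless MSB-first pass that recomputes each position's incoming borrow directly as a lexicographic comparison of the remaining suffixes; Pre_ restricts to equal-length digit strings, excluding a strictly longer second string whose unread tail A silently ignores.
-- outside the precondition, e.g. on subtraction_of_binaries('10', '011'): A returns '01', B returns '00'
import Mathlib
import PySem

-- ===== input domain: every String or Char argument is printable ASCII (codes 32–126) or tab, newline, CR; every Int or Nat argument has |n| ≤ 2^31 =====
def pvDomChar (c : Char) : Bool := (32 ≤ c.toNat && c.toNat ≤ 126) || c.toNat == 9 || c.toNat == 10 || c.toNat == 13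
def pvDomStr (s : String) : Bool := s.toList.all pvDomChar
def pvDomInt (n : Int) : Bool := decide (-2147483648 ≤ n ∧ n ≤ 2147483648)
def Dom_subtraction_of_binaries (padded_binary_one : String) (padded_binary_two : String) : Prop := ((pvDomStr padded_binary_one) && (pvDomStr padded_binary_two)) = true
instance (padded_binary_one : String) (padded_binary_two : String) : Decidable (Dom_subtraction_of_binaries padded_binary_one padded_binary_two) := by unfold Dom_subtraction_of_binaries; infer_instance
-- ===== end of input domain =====

-- B replaces A's carried-borrow LSB-to-MSB loop by a stateless MSB-first pass:
-- the borrow entering each position is recomputed directly as a lexicographic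
-- comparison of the remaining suffixes (objective: alternative; not faster —
-- the suffix comparison makes B O(n^2)).

-- ===== PORT A =====
-- Loop body of A's for-loop (named so the proofs can speak about one fold step).
-- int(s[i]): s[i] is pyGet? (none = IndexError; the default ' ' is never read inside Pre_),
-- int of that 1-char string is PySem.Int.ofChars? (none = ValueError, unreachable inside Pre_).
def pvABody (l1 l2 : List Char) (st : List (List Char) × Int) (i : Int) : List (List Char) × Int :=
  let d1 := (PySem.Int.ofChars? [(PySem.List.pyGet? l1 i).getD ' ']).getD 0
  let d2 := (PySem.Int.ofChars? [(PySem.List.pyGet? l2 i).getD ' ']).getD 0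
  let d1' := if st.2 ≠ 0 then d1 - 1 else d1
  let bw1 := if st.2 ≠ 0 then (0 : Int) else st.2
  let d1'' := if d1' < d2 then d1' + 2 else d1'
  let bw2 := if d1' < d2 then (1 : Int) else bw1
  (st.1 ++ [PySem.Int.toChars (d1'' - d2)], bw2)

def subtraction_of_binaries (padded_binary_one : String) (padded_binary_two : String) : String :=
  let l1 := padded_binary_one.toList
  let l2 := padded_binary_two.toList
  let res := (PySem.List.pyRange (PySem.List.len l1 - 1) (-1) (-1)).foldl (pvABody l1 l2) ([], 0)
  String.mk (PySem.Chars.join [] res.1.reverse)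

-- ===== PORT B =====
-- Python's '<' on strings, hand-ported (exact: lexicographic by code point,
-- a strict prefix is smaller).
def pvLexLt : List Char → List Char → Bool
  | [], [] => false
  | [], _ :: _ => true
  | _ :: _, [] => false
  | a :: x, b :: y => if a < b then true else if b < a then false else pvLexLt x y

-- Loop body of B's for-loop: slices are PySem.List.slice, s[i] is pyGet?,
-- int(c) is PySem.Int.ofChars? (defaults unreachable inside Pre_),
-- bool borrow used as an int is 1/0.
def pvBBody (l1 l2 : List Char) (acc : List (List Char)) (i : Int) : List (List Char) :=
  let borrow : Int :=
    if pvLexLt (PySem.List.slice l1 (some (i + 1)) none) (PySem.List.slice l2 (some (i + 1)) none)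
    then 1 else 0
  let bit := (PySem.Int.ofChars? [(PySem.List.pyGet? l1 i).getD ' ']).getD 0 - borrow
              - (PySem.Int.ofChars? [(PySem.List.pyGet? l2 i).getD ' ']).getD 0
  acc ++ [PySem.Int.toChars (if bit < 0 then bit + 2 else bit)]

def subtraction_of_binaries_alt (padded_binary_one : String) (padded_binary_two : String) : String :=
  let l1 := padded_binary_one.toList
  let l2 := padded_binary_two.toList
  let bits := (PySem.List.pyRange 0 (PySem.List.len l1) 1).foldl (pvBBody l1 l2) []
  String.mk (PySem.Chars.join [] bits)

-- ===== PRECONDITION & SPEC =====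
-- Pre_ is the natural domain: an empty minuend (both programs return '' without
-- reading the second string) or two equal-length digit strings. int(c) raises
-- ValueError on a non-digit character and a shorter second string raises
-- IndexError; Pre_ also excludes a strictly LONGER second string (on which A
-- still returns): A silently ignores its unread tail, while B compares whole
-- suffixes — the natural reading of 'padded' inputs is equal length.
def Pre_subtraction_of_binaries (padded_binary_one : String) (padded_binary_two : String) : Prop :=
  padded_binary_one = "" ∨
  (padded_binary_one.toList.length = padded_binary_two.toList.length ∧
  padded_binary_one.toList.all Char.isDigit = true ∧
  padded_binary_two.toList.all Char.isDigit = true)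
instance (padded_binary_one : String) (padded_binary_two : String) : Decidable (Pre_subtraction_of_binaries padded_binary_one padded_binary_two) := by unfold Pre_subtraction_of_binaries; infer_instance

def pvWitness_subtraction_of_binaries : String × String := ("10", "01")

def Spec_subtraction_of_binaries (padded_binary_one : String) (padded_binary_two : String) (out : String) : Prop := out = subtraction_of_binaries_alt padded_binary_one padded_binary_two
instance (padded_binary_one : String) (padded_binary_two : String) (out : String) : Decidable (Spec_subtraction_of_binaries padded_binary_one padded_binary_two out) := by unfold Spec_subtraction_of_binaries; infer_instance

-- ===== CLAIM (what is proved, stated in full; the proofs are below) =====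
def Claim_equal_subtraction_of_binaries : Prop := ∀ (padded_binary_one : String) (padded_binary_two : String), Dom_subtraction_of_binaries padded_binary_one padded_binary_two → Pre_subtraction_of_binaries padded_binary_one padded_binary_two → Spec_subtraction_of_binaries padded_binary_one padded_binary_two (subtraction_of_binaries padded_binary_one padded_binary_two)

-- ===== LEMMAS AND PROOFS =====

-- int(c) for one digit character
def pvDig (c : Char) : Int := (PySem.Int.ofChars? [c]).getD 0

def pvB2I (b : Bool) : Int := if b then 1 else 0

-- the borrow recurrence, LSB-first over pairs of digit chars
def pvBwStep (b : Bool) (p : Char × Char) : Bool := p.1 < p.2 || (p.1 == p.2 && b)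

-- the common per-position output digit
def pvOut (a c : Char) (bw : Bool) : Int :=
  let bit := pvDig a - pvB2I bw - pvDig c
  if bit < 0 then bit + 2 else bit

-- one step of A's borrow subtraction on digit values
def pvStepA (a b bw : Int) : Int × Int :=
  if (if bw ≠ 0 then a - 1 else a) < b then ((if bw ≠ 0 then a - 1 else a) + 2 - b, 1)
  else ((if bw ≠ 0 then a - 1 else a) - b, if bw ≠ 0 then (0 : Int) else bw)

-- A's whole loop, rewritten as structural recursion on the LSB-first char lists
def pvRunA : List Char → List Char → Int → List Int × Int
  | c1 :: x, c2 :: y, bw =>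
      let s := pvStepA (pvDig c1) (pvDig c2) bw
      let r := pvRunA x y s.2
      (s.1 :: r.1, r.2)
  | _, _, bw => ([], bw)

lemma pv_foldA (l1 l2 : List Char) :
    ∀ (k : Nat), k ≤ l1.length → k ≤ l2.length → ∀ (acc : List (List Char)) (bw : Int),
    (PySem.List.pyRange ((k : Int) - 1) (-1) (-1)).foldl (pvABody l1 l2) (acc, bw)
      = (acc ++ ((pvRunA ((l1.take k).reverse) ((l2.take k).reverse) bw).1.map PySem.Int.toChars),
         (pvRunA ((l1.take k).reverse) ((l2.take k).reverse) bw).2) := by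
  intro k
  induction k with
  | zero =>
      intro _ _ acc bw
      rw [show ((0 : Nat) : Int) - 1 = -1 by norm_num,
        PySem.List.pyRange_neg_one_eq_nil (by norm_num)]
      simp [pvRunA]
  | succ k ih =>
      intro hk1 hk2 acc bw
      have hk1' : k < l1.length := by omega
      have hk2' : k < l2.length := by omega
      have hc1 : ((k + 1 : Nat) : Int) - 1 = (k : Int) := by push_cast; ring
      rw [hc1, PySem.List.pyRange_neg_one_cons (by omega : (-1 : Int) < (k : Int)),
        List.foldl_cons]
      have hget1 : (PySem.List.pyGet? l1 ((k : Nat) : Int)).getD ' ' = l1[k] := by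
        simp [hk1']
      have hget2 : (PySem.List.pyGet? l2 ((k : Nat) : Int)).getD ' ' = l2[k] := by
        simp [hk2']
      have htake1 : (l1.take (k + 1)).reverse = l1[k] :: (l1.take k).reverse := by
        rw [List.take_succ_eq_append_getElem hk1']; simp
      have htake2 : (l2.take (k + 1)).reverse = l2[k] :: (l2.take k).reverse := by
        rw [List.take_succ_eq_append_getElem hk2']; simp
      rw [htake1, htake2]
      have hKey : ∀ (a b : Int),
          ((acc ++ [PySem.Int.toChars
              ((if (if bw ≠ 0 then a - 1 else a) < b then (if bw ≠ 0 then a - 1 else a) + 2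
                else (if bw ≠ 0 then a - 1 else a)) - b)],
            if (if bw ≠ 0 then a - 1 else a) < b then (1 : Int)
              else (if bw ≠ 0 then (0 : Int) else bw)) : List (List Char) × Int)
          = (acc ++ [PySem.Int.toChars (pvStepA a b bw).1], (pvStepA a b bw).2) := by
        intro a b
        unfold pvStepA
        split_ifs <;> rfl
      have hbody : pvABody l1 l2 (acc, bw) ((k : Nat) : Int)
          = (acc ++ [PySem.Int.toChars
              (pvStepA ((PySem.Int.ofChars? [l1[k]]).getD 0)
                ((PySem.Int.ofChars? [l2[k]]).getD 0) bw).1],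
             (pvStepA ((PySem.Int.ofChars? [l1[k]]).getD 0)
                ((PySem.Int.ofChars? [l2[k]]).getD 0) bw).2) := by
        simp only [pvABody, hget1, hget2]
        exact hKey _ _
      rw [hbody, ih (by omega) (by omega)]
      simp only [pvRunA, pvDig, List.map_cons, List.append_assoc, List.singleton_append]

-- digit characters: enumeration
lemma pv_char_eq {c d : Char} (h : c.toNat = d.toNat) : c = d :=
  Char.ext (UInt32.toNat_inj.mp h)

lemma pv_digit_enum {c : Char} (h : c.isDigit = true) :
    c = '0' ∨ c = '1' ∨ c = '2' ∨ c = '3' ∨ c = '4' ∨ c = '5' ∨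
    c = '6' ∨ c = '7' ∨ c = '8' ∨ c = '9' := by
  have hb : 48 ≤ c.toNat ∧ c.toNat ≤ 57 := by
    simp only [Char.isDigit, decide_eq_true_eq, Bool.and_eq_true,
      UInt32.le_iff_toNat_le] at h
    exact ⟨h.1, h.2⟩
  have h10 : c.toNat = 48 ∨ c.toNat = 49 ∨ c.toNat = 50 ∨ c.toNat = 51 ∨ c.toNat = 52 ∨
      c.toNat = 53 ∨ c.toNat = 54 ∨ c.toNat = 55 ∨ c.toNat = 56 ∨ c.toNat = 57 := by omega
  rcases h10 with h' | h' | h' | h' | h' | h' | h' | h' | h' | h'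
  · exact Or.inl (pv_char_eq (d := '0') h')
  · exact Or.inr (Or.inl (pv_char_eq (d := '1') h'))
  · exact Or.inr (Or.inr (Or.inl (pv_char_eq (d := '2') h')))
  · exact Or.inr (Or.inr (Or.inr (Or.inl (pv_char_eq (d := '3') h'))))
  · exact Or.inr (Or.inr (Or.inr (Or.inr (Or.inl (pv_char_eq (d := '4') h')))))
  · exact Or.inr (Or.inr (Or.inr (Or.inr (Or.inr (Or.inl (pv_char_eq (d := '5') h'))))))
  · exact Or.inr (Or.inr (Or.inr (Or.inr (Or.inr (Or.inr (Or.inl (pv_char_eq (d := '6') h')))))))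
  · exact Or.inr (Or.inr (Or.inr (Or.inr (Or.inr (Or.inr (Or.inr (Or.inl (pv_char_eq (d := '7') h'))))))))
  · exact Or.inr (Or.inr (Or.inr (Or.inr (Or.inr (Or.inr (Or.inr (Or.inr (Or.inl (pv_char_eq (d := '8') h')))))))))
  · exact Or.inr (Or.inr (Or.inr (Or.inr (Or.inr (Or.inr (Or.inr (Or.inr (Or.inr (pv_char_eq (d := '9') h')))))))))

-- A's one step on two digit chars, expressed through the common pvOut/pvBwStep
lemma pv_stepA_digits {a c : Char} (ha : a.isDigit = true) (hc : c.isDigit = true) (bw : Bool) :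
    pvStepA (pvDig a) (pvDig c) (pvB2I bw) = (pvOut a c bw, pvB2I (pvBwStep bw (a, c))) := by
  rcases pv_digit_enum ha with h | h | h | h | h | h | h | h | h | h <;> subst h <;>
    rcases pv_digit_enum hc with h' | h' | h' | h' | h' | h' | h' | h' | h' | h' <;> subst h' <;>
      cases bw <;> decide

-- A's loop yields, LSB-first, the per-position outputs with the folded borrow
lemma pv_runA_map : ∀ (x y : List Char), x.length = y.length →
    x.all Char.isDigit = true → y.all Char.isDigit = true → ∀ (bw : Bool),
    (pvRunA x y (pvB2I bw)).1
      = (List.range x.length).map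
          (fun j => pvOut (x.getD j ' ') (y.getD j ' ') (((x.zip y).take j).foldl pvBwStep bw)) := by
  intro x
  induction x with
  | nil => intro y _ _ _ bw; simp [pvRunA]
  | cons c1 x ih =>
      intro y hlen hdx hdy bw
      cases y with
      | nil => simp at hlen
      | cons c2 y =>
        simp only [List.all_cons, Bool.and_eq_true] at hdx hdy
        rw [show pvRunA (c1 :: x) (c2 :: y) (pvB2I bw)
            = ((pvStepA (pvDig c1) (pvDig c2) (pvB2I bw)).1
                :: (pvRunA x y (pvStepA (pvDig c1) (pvDig c2) (pvB2I bw)).2).1,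
               (pvRunA x y (pvStepA (pvDig c1) (pvDig c2) (pvB2I bw)).2).2) from rfl,
          pv_stepA_digits hdx.1 hdy.1 bw]
        simp only [List.length_cons, List.range_succ_eq_map, List.map_cons, List.map_map]
        refine List.cons_eq_cons.mpr ⟨by simp, ?_⟩
        rw [ih y (by simpa using hlen) hdx.2 hdy.2 (pvBwStep bw (c1, c2))]
        apply List.map_congr_left
        intro j _
        simp [List.zip_cons_cons]

-- Python's '<' on equal-length lists is the LSB-first borrow fold on the reversed lists
lemma pv_lex_eq_fold : ∀ (u v : List Char), u.length = v.length →
    pvLexLt u v = (u.reverse.zip v.reverse).foldl pvBwStep false := by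
  intro u
  induction u with
  | nil =>
      intro v hlen
      cases v with
      | nil => rfl
      | cons _ _ => simp at hlen
  | cons a u ih =>
      intro v hlen
      cases v with
      | nil => simp at hlen
      | cons b v =>
        have hlen' : u.length = v.length := by simpa using hlen
        have hzip : ((a :: u).reverse.zip (b :: v).reverse)
            = (u.reverse.zip v.reverse) ++ [(a, b)] := by
          simp only [List.reverse_cons]
          rw [List.zip_append (by simp [hlen'])]
          rfl
        rw [hzip, List.foldl_append, List.foldl_cons, List.foldl_nil, ← ih v hlen']
        show pvLexLt (a :: u) (b :: v) = pvBwStep (pvLexLt u v) (a, b)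
        simp only [pvLexLt, pvBwStep]
        rcases lt_trichotomy a b with h | h | h
        · simp [h]
        · subst h; simp
        · simp [h, asymm h, Ne.symm (ne_of_lt h)]

-- B's per-position element (named so pv_foldB can speak of it)
def pvBElem (l1 l2 : List Char) (i : Int) : List Char :=
  let borrow : Int :=
    if pvLexLt (PySem.List.slice l1 (some (i + 1)) none) (PySem.List.slice l2 (some (i + 1)) none)
    then 1 else 0
  let bit := (PySem.Int.ofChars? [(PySem.List.pyGet? l1 i).getD ' ']).getD 0 - borrow
              - (PySem.Int.ofChars? [(PySem.List.pyGet? l2 i).getD ' ']).getD 0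
  PySem.Int.toChars (if bit < 0 then bit + 2 else bit)

lemma pv_bbody_elem (l1 l2 : List Char) (acc : List (List Char)) (i : Int) :
    pvBBody l1 l2 acc i = acc ++ [pvBElem l1 l2 i] := rfl

-- B's loop builds the list of per-position outputs, MSB-first
lemma pv_foldB (l1 l2 : List Char) :
    ∀ (k : Nat), ∀ (acc : List (List Char)),
    (PySem.List.pyRange 0 (k : Int) 1).foldl (pvBBody l1 l2) acc
      = acc ++ (List.range k).map (fun (i : Nat) => pvBElem l1 l2 (i : Int)) := by
  intro k
  induction k with
  | zero => intro acc; simp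
  | succ k ih =>
      intro acc
      rw [show ((k + 1 : Nat) : Int) = (k : Int) + 1 by push_cast; ring,
        PySem.List.pyRange_one_succ_right (by omega : (0 : Int) ≤ (k : Int)), List.foldl_append,
        ih acc, List.foldl_cons, List.foldl_nil, pv_bbody_elem]
      simp [List.range_succ]

-- reversing a map over range flips the index
lemma pv_reverse_map_range {α : Type} (n : Nat) (f : Nat → α) :
    ((List.range n).map f).reverse = (List.range n).map (fun i => f (n - 1 - i)) := by
  apply List.ext_getElem (by simp)
  intro i h1 h2
  simp only [List.length_map, List.length_range] at h1 h2
  simp [List.getElem_reverse, List.getElem_map, List.getElem_range]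

-- take distributes over zip
lemma pv_take_zip (l l' : List Char) (n : Nat) :
    (l.zip l').take n = (l.take n).zip (l'.take n) := by
  simp [List.zip, List.take_zipWith]

-- ===== VERDICT (by name: the statement is the Claim_ definition above) =====
theorem subtraction_of_binaries_spec : Claim_equal_subtraction_of_binaries := by
  unfold Claim_equal_subtraction_of_binaries
  intro p1 p2 _ hpre
  rcases hpre with hempty | ⟨hlen, hd1, hd2⟩
  · -- empty minuend: both loops run zero times
    subst hempty
    rfl
  unfold Spec_subtraction_of_binaries subtraction_of_binaries subtraction_of_binaries_alt
  simp only [PySem.List.len_eq]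
  set l1 := p1.toList with hl1
  set l2 := p2.toList with hl2
  set n := l1.length with hn
  -- A's loop via pv_foldA at k = n, then the positional characterisation
  have hA := pv_foldA l1 l2 n le_rfl (le_of_eq hlen) [] 0
  have ht2 : l2.take n = l2 := by rw [hlen, List.take_length]
  rw [List.take_length, ht2] at hA
  rw [hA]
  simp only [List.nil_append]
  have hlenr : l1.reverse.length = l2.reverse.length := by
    simp only [List.length_reverse]; omega
  have hdr1 : l1.reverse.all Char.isDigit = true := by rw [List.all_reverse]; exact hd1
  have hdr2 : l2.reverse.all Char.isDigit = true := by rw [List.all_reverse]; exact hd2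
  have hrun := pv_runA_map l1.reverse l2.reverse hlenr hdr1 hdr2 false
  rw [show pvB2I false = (0 : Int) from rfl] at hrun
  rw [hrun]
  -- B's loop via pv_foldB
  rw [pv_foldB l1 l2 n []]
  simp only [List.nil_append]
  congr 1
  congr 1
  rw [List.map_map, pv_reverse_map_range, List.length_reverse, ← hn]
  apply List.map_congr_left
  intro i hi
  rw [List.mem_range] at hi
  -- identify A's output at LSB index n-1-i with B's element at MSB index i
  have hi2 : i < l2.length := by omega
  have hget1 : (PySem.List.pyGet? l1 ((i : Nat) : Int)).getD ' ' = l1.reverse.getD (n - 1 - i) ' ' := by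
    rw [PySem.List.pyGet?_natCast, List.getElem?_eq_getElem hi]
    rw [List.getD_eq_getElem _ _ (by simp only [List.length_reverse]; omega), List.getElem_reverse]
    simp only [Option.getD_some]
    congr 2
    omega
  have hget2 : (PySem.List.pyGet? l2 ((i : Nat) : Int)).getD ' ' = l2.reverse.getD (n - 1 - i) ' ' := by
    rw [PySem.List.pyGet?_natCast, List.getElem?_eq_getElem hi2]
    rw [List.getD_eq_getElem _ _ (by simp only [List.length_reverse]; omega), List.getElem_reverse]
    simp only [Option.getD_some]
    congr 2
    omega
  have hslice1 : PySem.List.slice l1 (some ((i : Int) + 1)) none = l1.drop (i + 1) := by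
    rw [show ((i : Int) + 1) = ((i + 1 : Nat) : Int) by push_cast; ring,
      PySem.List.slice_from_natCast]
  have hslice2 : PySem.List.slice l2 (some ((i : Int) + 1)) none = l2.drop (i + 1) := by
    rw [show ((i : Int) + 1) = ((i + 1 : Nat) : Int) by push_cast; ring,
      PySem.List.slice_from_natCast]
  have e1 : l1.length - (i + 1) = n - 1 - i := by omega
  have e2 : l2.length - (i + 1) = n - 1 - i := by omega
  have hlex : pvLexLt (l1.drop (i + 1)) (l2.drop (i + 1))
      = ((l1.reverse.zip l2.reverse).take (n - 1 - i)).foldl pvBwStep false := by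
    rw [pv_lex_eq_fold _ _ (by simp only [List.length_drop]; omega),
      List.reverse_drop, List.reverse_drop, e1, e2, ← pv_take_zip]
  simp only [Function.comp, pvBElem, hget1, hget2, hslice1, hslice2, hlex, pvOut, pvDig, pvB2I]
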